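-- pv_equiv track=rewrite | github.com/zeomzzz/python-programmers-lv.0 | 120843_공 던지기.py | solution
-- ===== SOURCE A (Python) =====
-- def solution(numbers, k):
--
--     tmp = []
--
--     if len(numbers) % 2 == 0 :
--
--         for i in range(0, len(numbers)//2) :
--             tmp.append(i*2)
--
--         tmp_index = (k-1) % (len(numbers)//2)
--         answer = tmp[tmp_index] + 1
--
--     else :
--         for i in range(0, len(numbers)//2 + 1) :
--             tmp.append(i*2)
--
--         for i in range(0, len(numbers)//2) :
--             tmp.append(i*2 + 1)
--
--         tmp_index = (k-1) % len(numbers)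
--         answer = tmp[tmp_index] + 1
--
--     return answer
-- ===== SOURCE B (Python) =====
-- def solution(numbers, k):
--     # closed form: the k-th throw reaches player (2*(k-1)) % n + 1
--     return (2 * (k - 1)) % len(numbers) + 1
-- ===== Notes on version B (the rewrite author's own statement) =====
-- stated objective: faster
-- what changed: Replaces building the list of visited positions and indexing into it by the closed-form (2*(k-1)) % len(numbers) + 1.
import Mathlib
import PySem

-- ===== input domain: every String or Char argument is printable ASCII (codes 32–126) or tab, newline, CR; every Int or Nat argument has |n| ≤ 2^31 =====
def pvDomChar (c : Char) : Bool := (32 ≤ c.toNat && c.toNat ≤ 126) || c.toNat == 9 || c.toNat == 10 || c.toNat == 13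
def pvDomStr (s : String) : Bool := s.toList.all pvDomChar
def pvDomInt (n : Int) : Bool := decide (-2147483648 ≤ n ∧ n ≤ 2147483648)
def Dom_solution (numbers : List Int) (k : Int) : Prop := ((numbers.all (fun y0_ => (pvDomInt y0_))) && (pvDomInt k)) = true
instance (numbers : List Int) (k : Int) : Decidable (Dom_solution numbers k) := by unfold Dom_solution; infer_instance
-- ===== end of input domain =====

-- B replaces A's list-building loops by the closed form (2*(k-1)) % n + 1 (O(1) vs O(n)).

-- ===== PORT A =====
-- literal port: the append loops become maps over the same ranges; tmp[tmp_index]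
-- is always in range under Pre_, so pyGetD _ _ 0 is exact there
def solution (numbers : List Int) (k : Int) : Int :=
  let n : Int := numbers.length
  if PySem.Int.mod n 2 = 0 then
    let tmp := (PySem.List.pyRange 0 (PySem.Int.floordiv n 2) 1).map (fun i => i * 2)
    let tmpIndex := PySem.Int.mod (k - 1) (PySem.Int.floordiv n 2)
    PySem.List.pyGetD tmp tmpIndex 0 + 1
  else
    let tmp := (PySem.List.pyRange 0 (PySem.Int.floordiv n 2 + 1) 1).map (fun i => i * 2)
             ++ (PySem.List.pyRange 0 (PySem.Int.floordiv n 2) 1).map (fun i => i * 2 + 1)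
    let tmpIndex := PySem.Int.mod (k - 1) n
    PySem.List.pyGetD tmp tmpIndex 0 + 1

-- ===== PORT B =====
def solution_alt (numbers : List Int) (k : Int) : Int :=
  PySem.Int.mod (2 * (k - 1)) (numbers.length : Int) + 1

-- ===== PRECONDITION & SPEC =====
-- A raises ZeroDivisionError on the empty list (len//2 = 0); Pre_ excludes it (B raises there too).
def Pre_solution (numbers : List Int) (k : Int) : Prop := numbers ≠ []
instance (numbers : List Int) (k : Int) : Decidable (Pre_solution numbers k) := by unfold Pre_solution; infer_instance
def pvWitness_solution : List Int × Int := ([3, 1, 4], 2)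

def Spec_solution (numbers : List Int) (k : Int) (out : Int) : Prop := out = solution_alt numbers k
instance (numbers : List Int) (k : Int) (out : Int) : Decidable (Spec_solution numbers k out) := by unfold Spec_solution; infer_instance

-- ===== CLAIM (what is proved, stated in full; the proofs are below) =====
def Claim_equal_solution : Prop := ∀ (numbers : List Int) (k : Int), Dom_solution numbers k → Pre_solution numbers k → Spec_solution numbers k (solution numbers k)

-- ===== LEMMAS AND PROOFS =====

theorem solution_eq_alt (numbers : List Int) (k : Int) (hne : numbers ≠ []) :
    solution numbers k = solution_alt numbers k := by
  simp only [solution, solution_alt]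
  set N : Nat := numbers.length with hN
  have hNpos : 0 < N := List.length_pos_iff.mpr hne
  have hn : (0:Int) < (N : Int) := by exact_mod_cast hNpos
  rcases Nat.even_or_odd N with ⟨m, hm⟩ | ⟨m, hm⟩
  · -- even: N = 2m, m > 0
    have hmpos : 0 < m := by omega
    have hmod : PySem.Int.mod (N : Int) 2 = 0 := by
      rw [PySem.Int.mod_eq_emod_of_pos (by norm_num)]; omega
    have hdiv : PySem.Int.floordiv (N : Int) 2 = (m : Int) := by
      rw [PySem.Int.floordiv_eq_ediv_of_pos (by norm_num)]; omega
    simp only [hmod, hdiv, if_pos]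
    have hmz : (0:Int) < (m:Int) := by exact_mod_cast hmpos
    set i : Int := PySem.Int.mod (k - 1) (m : Int) with hi
    have hi0 : 0 ≤ i := PySem.Int.mod_nonneg _ hmz
    have hilt : i < (m : Int) := PySem.Int.mod_lt _ hmz
    rw [PySem.List.pyGetD_map_pyRange_of_nonneg _ _ _ _ hi0 hilt]
    have hkey : PySem.Int.mod (2 * (k - 1)) (N : Int) = 2 * i := by
      rw [hi, PySem.Int.mod_eq_emod_of_pos hmz, PySem.Int.mod_eq_emod_of_pos hn]
      have hN2 : (N : Int) = 2 * (m : Int) := by omega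
      rw [hN2, Int.mul_emod_mul_of_pos _ _ (by norm_num : (0:Int) < 2)]
    omega
  · -- odd: N = 2m + 1
    have hmod : PySem.Int.mod (N : Int) 2 = 1 := by
      rw [PySem.Int.mod_eq_emod_of_pos (by norm_num)]; omega
    have hdiv : PySem.Int.floordiv (N : Int) 2 = (m : Int) := by
      rw [PySem.Int.floordiv_eq_ediv_of_pos (by norm_num)]; omega
    simp only [hmod, hdiv]
    rw [if_neg (by norm_num : (1:Int) ≠ 0)]
    set i : Int := PySem.Int.mod (k - 1) (N : Int) with hi
    have hi0 : 0 ≤ i := PySem.Int.mod_nonneg _ hn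
    have hilt : i < (N : Int) := PySem.Int.mod_lt _ hn
    have hNm : (N : Int) = 2 * (m : Int) + 1 := by omega
    have hkey : PySem.Int.mod (2 * (k - 1)) (N : Int) = (2 * i) % (N : Int) := by
      rw [hi, PySem.Int.mod_eq_emod_of_pos hn, PySem.Int.mod_eq_emod_of_pos hn]
      conv_lhs => rw [Int.mul_emod]
      conv_rhs => rw [Int.mul_emod]
      rw [Int.emod_emod_of_dvd (k - 1) (dvd_refl ((N:Nat) : Int))]
    rw [hkey]
    have hlen1 : ((PySem.List.pyRange 0 ((m:Int) + 1) 1).map (fun i => i * 2)).length = m + 1 := by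
      simp [PySem.List.length_pyRange_one]
    have hlen2 : ((PySem.List.pyRange 0 (m:Int) 1).map (fun i => i * 2 + 1)).length = m := by
      simp [PySem.List.length_pyRange_one]
    have hlenT : (((PySem.List.pyRange 0 ((m:Int) + 1) 1).map (fun i => i * 2))
        ++ ((PySem.List.pyRange 0 (m:Int) 1).map (fun i => i * 2 + 1))).length = m + 1 + m := by
      simp [hlen1, hlen2]
    rw [PySem.List.pyGetD_eq_getElem _ 0 hi0 (by rw [hlenT]; omega)]
    by_cases hc : i ≤ (m : Int)
    · rw [List.getElem_append_left (by rw [hlen1]; omega)]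
      have hfst := PySem.List.pyGetD_map_pyRange_of_nonneg (fun j => j * 2) ((m:Int)+1) i 0 hi0 (by omega)
      rw [PySem.List.pyGetD_eq_getElem _ 0 hi0 (by rw [hlen1]; omega)] at hfst
      rw [hfst]
      show i * 2 + 1 = 2 * i % (N : Int) + 1
      have : (2 * i) % (N : Int) = 2 * i := Int.emod_eq_of_lt (by omega) (by omega)
      omega
    · rw [List.getElem_append_right (by rw [hlen1]; omega)]
      have hsnd := PySem.List.pyGetD_map_pyRange_of_nonneg (fun j => j * 2 + 1) (m:Int) (i - ((m:Int)+1)) 0 (by omega) (by omega)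
      rw [PySem.List.pyGetD_eq_getElem _ 0 (by omega) (by rw [hlen2]; omega)] at hsnd
      have hidx : (i - ((m:Int)+1)).toNat = i.toNat - (m + 1) := by omega
      simp only [hidx] at hsnd
      simp only [hlen1]
      rw [hsnd]
      show (i - ((m:Int)+1)) * 2 + 1 + 1 = 2 * i % (N : Int) + 1
      have hsub : (2 * i) % (N : Int) = (2 * i - (N : Int)) % (N : Int) := (Int.sub_emod_right _ _).symm
      have heq : (2 * i - (N : Int)) % (N : Int) = 2 * i - (N : Int) := Int.emod_eq_of_lt (by omega) (by omega)
      omega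

-- ===== VERDICT (by name: the statement is the Claim_ definition above) =====
theorem solution_spec : Claim_equal_solution := by
  intro numbers k _ hpre
  exact solution_eq_alt numbers k hpre
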